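-- pv_equiv track=rewrite | github.com/AndrewSteel/alice | docker/compose/automations/alice-ha-sync/main.py | build_template_map
-- ===== SOURCE A (Python) =====
-- def build_template_map(templates: list[dict]) -> dict[str, list[dict]]:
--     """Build a lookup: domain -> list of template dicts."""
--     tmap: dict[str, list[dict]] = {}
--     for t in templates:
--         d = t["domain"]
--         if d not in tmap:
--             tmap[d] = []
--         tmap[d].append(t)
--     return tmap
-- ===== SOURCE B (Python) =====
-- def build_template_map(templates: list[dict]) -> dict[str, list[dict]]:
--     """Build a lookup: domain -> list of template dicts (grouped by filtering)."""
--     domains = dict.fromkeys(t["domain"] for t in templates)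
--     return {d: [t for t in templates if t["domain"] == d] for d in domains}
-- ===== Notes on version B (the rewrite author's own statement) =====
-- stated objective: simpler
-- what changed: B replaces the single-pass bucket-append loop by a two-phase grouping: collect the distinct domains in first-occurrence order with dict.fromkeys, then build each group with a filtering comprehension over the whole list.
import Mathlib
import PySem

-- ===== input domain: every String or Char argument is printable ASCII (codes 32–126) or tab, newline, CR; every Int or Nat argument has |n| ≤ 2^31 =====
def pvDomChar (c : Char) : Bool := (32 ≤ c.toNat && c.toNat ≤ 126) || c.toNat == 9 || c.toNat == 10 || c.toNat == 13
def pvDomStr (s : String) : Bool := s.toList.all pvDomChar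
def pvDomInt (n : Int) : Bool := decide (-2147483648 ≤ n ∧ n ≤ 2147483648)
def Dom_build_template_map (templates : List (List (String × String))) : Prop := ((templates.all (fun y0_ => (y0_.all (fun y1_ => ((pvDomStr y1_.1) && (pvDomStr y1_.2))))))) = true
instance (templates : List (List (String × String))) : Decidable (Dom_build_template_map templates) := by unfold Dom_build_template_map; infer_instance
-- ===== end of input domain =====

-- B groups by first collecting the distinct domains (dict.fromkeys) and then filtering the
-- full list once per domain, instead of A's single-pass bucket-append loop; objective: simpler.

-- ===== PORT A =====
-- A: tmap = {}; for t in templates: d = t["domain"]; if d not in tmap: tmap[d] = []; tmap[d].append(t)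
def build_template_map (templates : List (List (String × String))) : List (String × List (List (String × String))) :=
  (templates.foldl (fun tmap t =>
    match (PySem.Dict.mk t).get? "domain" with
    | none => tmap   -- KeyError in Python; excluded by Pre_
    | some d =>
      let tmap := if tmap.contains d then tmap else tmap.insert d []
      tmap.insert d (tmap.getD d [] ++ [t])   -- tmap[d].append(t)
  ) (PySem.Dict.empty : PySem.Dict String (List (List (String × String))))).items

-- ===== PORT B =====
-- B: domains = dict.fromkeys(t["domain"] for t in templates)
--    return {d: [t for t in templates if t["domain"] == d] for d in domains}
def build_template_map_alt (templates : List (List (String × String))) : List (String × List (List (String × String))) :=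
  let domains := PySem.List.dedup (templates.filterMap (fun t => (PySem.Dict.mk t).get? "domain"))
  domains.map (fun d => (d, templates.filter (fun t => (PySem.Dict.mk t).get? "domain" == some d)))

-- ===== PRECONDITION & SPEC =====
-- Pre_ excludes exactly the inputs where some template lacks a "domain" key, on which A raises KeyError.
def Pre_build_template_map (templates : List (List (String × String))) : Prop :=
  ∀ t ∈ templates, ((PySem.Dict.mk t).get? "domain").isSome = true
instance (templates : List (List (String × String))) : Decidable (Pre_build_template_map templates) := by unfold Pre_build_template_map; infer_instance

def pvWitness_build_template_map : (List (List (String × String))) :=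
  [[("domain", "light"), ("name", "a")], [("domain", "switch")], [("domain", "light"), ("name", "b")]]

def Spec_build_template_map (templates : List (List (String × String))) (out : List (String × List (List (String × String)))) : Prop := out = build_template_map_alt templates
instance (templates : List (List (String × String))) (out : List (String × List (List (String × String)))) : Decidable (Spec_build_template_map templates out) := by unfold Spec_build_template_map; infer_instance

-- ===== CLAIM (what is proved, stated in full; the proofs are below) =====
def Claim_equal_build_template_map : Prop := ∀ (templates : List (List (String × String))), Dom_build_template_map templates → Pre_build_template_map templates → Spec_build_template_map templates (build_template_map templates)

-- ===== LEMMAS AND PROOFS =====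

-- the lookup key of one template, and the (domain, template) pairs A effectively folds over
def pvKey (t : List (String × String)) : Option String := (PySem.Dict.mk t).get? "domain"

def pvPairs (templates : List (List (String × String))) : List (String × List (String × String)) :=
  templates.filterMap (fun t => (pvKey t).map (fun d => (d, t)))

-- A's loop body, at a template whose key is present, is exactly a Dict.modify append step
theorem pvStep_eq_modify (tmap : PySem.Dict String (List (List (String × String))))
    (t : List (String × String)) (d : String) :
    (let tm := if tmap.contains d then tmap else tmap.insert d [];
     tm.insert d (tm.getD d [] ++ [t])) = tmap.modify d [] (· ++ [t]) := by
  by_cases h : tmap.contains d = true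
  · simp [h, PySem.Dict.modify]
  · simp only [Bool.not_eq_true] at h
    simp [h, PySem.Dict.insert_insert_self, PySem.Dict.getD_insert_self,
      PySem.Dict.getD_of_not_contains _ _ h, PySem.Dict.modify]

-- A's fold over templates equals the modify-fold over the (domain, template) pairs
theorem pvFold_eq (templates : List (List (String × String)))
    (d0 : PySem.Dict String (List (List (String × String)))) :
    templates.foldl (fun tmap t =>
      match (PySem.Dict.mk t).get? "domain" with
      | none => tmap
      | some d =>
        let tm := if tmap.contains d then tmap else tmap.insert d []
        tm.insert d (tm.getD d [] ++ [t])) d0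
    = (pvPairs templates).foldl (fun d p => d.modify p.1 [] (· ++ [p.2])) d0 := by
  induction templates generalizing d0 with
  | nil => rfl
  | cons t rest ih =>
    simp only [List.foldl_cons, pvPairs, List.filterMap_cons]
    cases hk : pvKey t with
    | none =>
      simp only [pvKey] at hk
      rw [hk]
      simp only [Option.map_none]
      exact ih d0
    | some d =>
      simp only [pvKey] at hk
      rw [hk]
      simp only [Option.map_some, List.foldl_cons]
      rw [pvStep_eq_modify d0 t d]
      exact ih _

-- keys of the pairs are the keys of the templates
theorem pvPairs_map_fst (templates : List (List (String × String))) :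
    (pvPairs templates).map Prod.fst = templates.filterMap pvKey := by
  induction templates with
  | nil => rfl
  | cons t rest ih =>
    simp only [pvPairs, List.filterMap_cons] at *
    cases hk : pvKey t with
    | none => simp [hk, ih]
    | some d => simp [ih]

-- filtering the pairs at a domain is filtering the templates at that domain
theorem pvPairs_filter (templates : List (List (String × String))) (d : String) :
    ((pvPairs templates).filter (fun p => p.1 == d)).map (fun p => p.2)
      = templates.filter (fun t => pvKey t == some d) := by
  induction templates with
  | nil => rfl
  | cons t rest ih =>
    simp only [pvPairs, List.filterMap_cons] at *
    cases hk : pvKey t with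
    | none => simp [hk, ih]
    | some c =>
      by_cases hc : c = d <;> simp [hk, hc, ih]

-- ===== VERDICT (by name: the statement is the Claim_ definition above) =====
theorem build_template_map_spec : Claim_equal_build_template_map := by
  intro templates _ _
  show build_template_map templates = build_template_map_alt templates
  unfold build_template_map build_template_map_alt
  rw [pvFold_eq]
  set D := (pvPairs templates).foldl (fun d p => d.modify p.1 [] (· ++ [p.2])) PySem.Dict.empty with hD
  have hkeys : D.keys = PySem.List.dedup (templates.filterMap (fun t => (PySem.Dict.mk t).get? "domain")) := by
    rw [hD]
    rw [PySem.Dict.keys_foldl_modify_key (pvPairs templates) Prod.fst [] (fun _ p => (· ++ [p.2]))]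
    rw [PySem.Dict.keys_empty, PySem.Set.update_nil_left, pvPairs_map_fst]
    rfl
  have hnd : D.keys.Nodup := by
    rw [hD]
    exact PySem.Dict.nodup_keys_foldl_modify_key (pvPairs templates) Prod.fst [] (fun _ p => (· ++ [p.2]))
      PySem.Dict.empty (by simp [PySem.Dict.keys_empty])
  rw [PySem.Dict.items_eq_map_keys D hnd [], hkeys]
  apply List.map_congr_left
  intro d _
  have hg : D.getD d [] = templates.filter (fun t => pvKey t == some d) := by
    rw [hD, PySem.Dict.getD_foldl_modify_append, pvPairs_filter]
    simp [PySem.Dict.getD_empty]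
  simp [hg, pvKey]
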